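-- pv_equiv track=rewrite | github.com/KNU-HAEDAL/2024-SS-small-group-ALSol | HJBAE/1to10/9.py | solution
-- ===== SOURCE A (Python) =====
-- def gwalho_pair(s):
--     stack = []
--     match_pair = {')': '(', ']': '[', '}': '{'}
--
--     for char in s:
--         if char in '({[':
--             stack.append(char)
--         elif char in ')}]':
--             if not stack or stack[-1] != match_pair[char]:
--                 return False
--             stack.pop()
--
--     return not stack
--
-- def rotate_gwalho(s):
--     return s[1:] + s[0]
--
-- def solution(s):
--     count = 0
--     n = len(s)
--
--     for i in range(n):
--         if gwalho_pair(s):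
--             count += 1
--         s = rotate_gwalho(s)
--
--     return count
-- ===== SOURCE B (Python) =====
-- def _valid(t, pair):
--     st = []
--     for c in t:
--         if c in '([{':
--             st.append(c)
--         elif not st or st.pop() != pair[c]:
--             return False
--     return not st
--
-- def solution(s):
--     pair = {')': '(', ']': '[', '}': '{'}
--     t = [c for c in s if c in '()[]{}']
--     m = len(t)
--     if m == 0:
--         return len(s)
--     valid = [_valid(t[k:] + t[:k], pair) for k in range(m)]
--     count = 0
--     b = 0
--     for c in s:
--         if valid[b % m]:
--             count += 1
--         if c in '()[]{}':
--             b += 1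
--     return count
-- ===== Notes on version B (the rewrite author's own statement) =====
-- stated objective: faster
-- what changed: Instead of re-checking every character rotation with a full stack scan, B filters the bracket characters out once, precomputes bracket-validity for each rotation class of the bracket subsequence, and counts valid starts in a single pass over the string using running prefix bracket counts.
import Mathlib
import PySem

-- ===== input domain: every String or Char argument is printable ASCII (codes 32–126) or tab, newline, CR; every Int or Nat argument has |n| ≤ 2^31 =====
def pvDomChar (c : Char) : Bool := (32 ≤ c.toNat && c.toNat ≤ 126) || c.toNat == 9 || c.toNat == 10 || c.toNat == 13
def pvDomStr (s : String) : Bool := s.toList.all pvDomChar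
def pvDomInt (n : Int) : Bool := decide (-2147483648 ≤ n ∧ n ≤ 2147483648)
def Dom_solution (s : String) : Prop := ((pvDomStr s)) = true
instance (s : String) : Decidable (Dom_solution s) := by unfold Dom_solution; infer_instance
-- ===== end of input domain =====

-- B filters the brackets out once, precomputes validity per rotation class of the bracket
-- subsequence, and counts in one pass over the string (objective: faster when brackets are
-- only a fraction of the characters).

-- ===== PORT A =====
-- `char in '({['`
def pvIsOpen (c : Char) : Bool := c = '(' || c = '{' || c = '['
-- `char in ')}]'`
def pvIsClose (c : Char) : Bool := c = ')' || c = '}' || c = ']'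
-- `match_pair[char]` for the three closing brackets (only ever applied to them)
def pvMatchPair (c : Char) : Char := if c = ')' then '(' else if c = ']' then '[' else '{'

-- the `for char in s` loop of gwalho_pair, with its early `return False`
def gwalhoLoop (stack : List Char) : List Char → Bool
  | [] => stack.isEmpty
  | c :: rest =>
    if pvIsOpen c then gwalhoLoop (stack ++ [c]) rest
    else if pvIsClose c then
      match stack.getLast? with
      | none => false
      | some t => if t ≠ pvMatchPair c then false else gwalhoLoop stack.dropLast rest
    else gwalhoLoop stack rest

def gwalho_pair (s : List Char) : Bool := gwalhoLoop [] s

-- `s[1:] + s[0]`; only ever applied to nonempty strings (the loop body runs only when n ≥ 1),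
-- where `s[0]` as a one-character string is `take 1`
def rotate_gwalho (s : List Char) : List Char := s.drop 1 ++ s.take 1

def solution (s : String) : Int :=
  let l := s.toList
  let n := l.length
  let res := (List.range n).foldl
    (fun (st : Nat × List Char) _ =>
      ((if gwalho_pair st.2 then st.1 + 1 else st.1), rotate_gwalho st.2))
    (0, l)
  (res.1 : Int)

-- ===== PORT B =====
-- `c in '()[]{}'`
def pvIsBr (c : Char) : Bool :=
  c = '(' || c = ')' || c = '[' || c = ']' || c = '{' || c = '}'

-- the loop of _valid: `st.pop() != pair[c]` = compare the last element, drop it on success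
def validLoop (st : List Char) : List Char → Bool
  | [] => st.isEmpty
  | c :: rest =>
    if pvIsOpen c then validLoop (st ++ [c]) rest
    else
      match st.getLast? with
      | none => false
      | some p => if p ≠ pvMatchPair c then false else validLoop st.dropLast rest

def solution_alt (s : String) : Int :=
  let l := s.toList
  let t := l.filter pvIsBr
  let m := t.length
  if m = 0 then (l.length : Int)
  else
    -- valid[k] = _valid(t[k:] + t[:k])
    let valid := (List.range m).map (fun k => validLoop [] (t.drop k ++ t.take k))
    -- one pass: b counts brackets seen so far; the index b % m is always in range
    let res := l.foldl
      (fun (st : Nat × Nat) c =>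
        ((if valid.getD (st.2 % m) false then st.1 + 1 else st.1),
         st.2 + (if pvIsBr c then 1 else 0)))
      (0, 0)
    (res.1 : Int)

-- ===== PRECONDITION & SPEC =====
def Spec_solution (s : String) (out : Int) : Prop := out = solution_alt s
instance (s : String) (out : Int) : Decidable (Spec_solution s out) := by unfold Spec_solution; infer_instance

-- ===== CLAIM (what is proved, stated in full; the proofs are below) =====
def Claim_equal_solution : Prop := ∀ (s : String), Dom_solution s → Spec_solution s (solution s)

-- ===== LEMMAS AND PROOFS =====

-- the two bracket tests agree
theorem isBr_eq (c : Char) : pvIsBr c = (pvIsOpen c || pvIsClose c) := by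
  simp only [pvIsBr, pvIsOpen, pvIsClose]
  rw [Bool.eq_iff_iff]
  simp only [Bool.or_eq_true, decide_eq_true_eq]
  tauto

-- on a closing (non-open) character, both loops do the pop-and-compare step
theorem gwalhoLoop_close (stack : List Char) (c : Char) (rest : List Char)
    (ho : ¬ pvIsOpen c = true) (hc : pvIsClose c = true) :
    gwalhoLoop stack (c :: rest)
    = (match stack.getLast? with
       | none => false
       | some t => if t ≠ pvMatchPair c then false else gwalhoLoop stack.dropLast rest) := by
  simp [gwalhoLoop, ho, hc]

theorem validLoop_close (stack : List Char) (c : Char) (rest : List Char)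
    (ho : ¬ pvIsOpen c = true) :
    validLoop stack (c :: rest)
    = (match stack.getLast? with
       | none => false
       | some t => if t ≠ pvMatchPair c then false else validLoop stack.dropLast rest) := by
  simp [validLoop, ho]

-- gwalho_pair ignores non-bracket characters
theorem gwalhoLoop_filter (l : List Char) : ∀ stack,
    gwalhoLoop stack l = gwalhoLoop stack (l.filter pvIsBr) := by
  induction l with
  | nil => intro stack; rfl
  | cons c rest ih =>
    intro stack
    by_cases ho : pvIsOpen c = true
    · have hb : pvIsBr c = true := by rw [isBr_eq, ho]; simp
      simp [gwalhoLoop, hb, ho, ih]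
    · by_cases hc : pvIsClose c = true
      · have hb : pvIsBr c = true := by rw [isBr_eq, hc]; simp
        rw [List.filter_cons_of_pos hb, gwalhoLoop_close stack c rest ho hc,
          gwalhoLoop_close stack c (rest.filter pvIsBr) ho hc]
        cases stack.getLast? with
        | none => rfl
        | some t =>
          by_cases hm : t = pvMatchPair c <;> simp [hm, ih]
      · have hb : ¬ pvIsBr c = true := by rw [isBr_eq, Bool.or_eq_true]; tauto
        rw [List.filter_cons_of_neg hb]
        simp [gwalhoLoop, ho, hc, ih]

-- on bracket-only input the two checkers agree
theorem gwalhoLoop_eq_validLoop (l : List Char) (hl : ∀ c ∈ l, pvIsBr c = true) :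
    ∀ stack, gwalhoLoop stack l = validLoop stack l := by
  induction l with
  | nil => intro stack; rfl
  | cons c rest ih =>
    intro stack
    have hc : pvIsBr c = true := hl c (by simp)
    have hrest : ∀ x ∈ rest, pvIsBr x = true := fun x hx => hl x (by simp [hx])
    by_cases ho : pvIsOpen c = true
    · simp [gwalhoLoop, validLoop, ho, ih hrest]
    · have hcl : pvIsClose c = true := by
        rw [isBr_eq, Bool.or_eq_true] at hc
        tauto
      rw [gwalhoLoop_close stack c rest ho hcl, validLoop_close stack c rest ho]
      cases stack.getLast? with
      | none => rfl
      | some t =>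
        by_cases hm : t = pvMatchPair c <;> simp [hm, ih hrest]

-- one rotation step on the explicit form
theorem rot_step (l : List Char) (i : Nat) (h : i < l.length) :
    rotate_gwalho (l.drop i ++ l.take i) = l.drop (i + 1) ++ l.take (i + 1) := by
  have hlen : 1 ≤ (l.drop i).length := by simp; omega
  have hdrop : (l.drop i ++ l.take i).drop 1 = (l.drop i).drop 1 ++ l.take i :=
    List.drop_append_of_le_length hlen
  have htake : (l.drop i ++ l.take i).take 1 = (l.drop i).take 1 :=
    List.take_append_of_le_length hlen
  have hget : l.drop i = l[i] :: l.drop (i + 1) := List.drop_eq_getElem_cons h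
  have htake1 : (l.drop i).take 1 = [l[i]] := by rw [hget]; rfl
  have hdrop1 : (l.drop i).drop 1 = l.drop (i + 1) := by rw [hget]; rfl
  have htsucc : l.take (i + 1) = l.take i ++ [l[i]] := by
    rw [List.take_add_one]
    simp [List.getElem?_eq_getElem h]
  rw [rotate_gwalho, hdrop, htake, htake1, hdrop1, htsucc, List.append_assoc]

-- A's loop after k steps: the count so far and the current rotation
theorem A_fold (l : List Char) : ∀ k, k ≤ l.length →
    (List.range k).foldl
      (fun (st : Nat × List Char) _ =>
        ((if gwalho_pair st.2 then st.1 + 1 else st.1), rotate_gwalho st.2))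
      (0, l)
    = ((List.range k).countP (fun i => gwalho_pair (l.drop i ++ l.take i)),
       l.drop k ++ l.take k) := by
  intro k
  induction k with
  | zero => intro _; simp
  | succ k ih =>
    intro hk
    have hk' : k ≤ l.length := Nat.le_of_succ_le hk
    rw [List.range_succ, List.foldl_append, List.countP_append, ih hk']
    simp only [List.foldl_cons, List.foldl_nil, List.countP_cons, List.countP_nil]
    rw [rot_step l k hk]
    by_cases hp : gwalho_pair (l.drop k ++ l.take k) = true <;> simp [hp]

-- filtering commutes with rotation
theorem filter_rot (l : List Char) (i : Nat) :
    (l.drop i ++ l.take i).filter pvIsBr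
    = (l.filter pvIsBr).drop (((l.take i).filter pvIsBr).length)
      ++ (l.filter pvIsBr).take (((l.take i).filter pvIsBr).length) := by
  have hsplit : l.filter pvIsBr = (l.take i).filter pvIsBr ++ (l.drop i).filter pvIsBr := by
    rw [← List.filter_append, List.take_append_drop]
  rw [List.filter_append, hsplit, List.drop_left, List.take_left]

-- number of brackets in a prefix is at most the total
theorem bcount_le (l : List Char) (i : Nat) :
    ((l.take i).filter pvIsBr).length ≤ (l.filter pvIsBr).length := by
  have hsplit : l.filter pvIsBr = (l.take i).filter pvIsBr ++ (l.drop i).filter pvIsBr := by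
    rw [← List.filter_append, List.take_append_drop]
  rw [hsplit, List.length_append]
  omega

-- reading valid[b % m] is checking the rotation by b of t
theorem valid_getD (t : List Char) (m : Nat) (hm : m = t.length) (hm0 : m ≠ 0)
    (b : Nat) (hb : b ≤ m) :
    ((List.range m).map (fun k => validLoop [] (t.drop k ++ t.take k))).getD (b % m) false
    = validLoop [] (t.drop b ++ t.take b) := by
  have hlt : b % m < m := Nat.mod_lt _ (Nat.pos_of_ne_zero hm0)
  have hget : ((List.range m).map (fun k => validLoop [] (t.drop k ++ t.take k))).getD (b % m) false
      = validLoop [] (t.drop (b % m) ++ t.take (b % m)) := by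
    rw [List.getD_eq_getElem?_getD, List.getElem?_map, List.getElem?_range hlt]
    rfl
  rw [hget]
  rcases Nat.lt_or_ge b m with h | h
  · rw [Nat.mod_eq_of_lt h]
  · have hbm : b = m := le_antisymm hb h
    subst hbm
    rw [Nat.mod_self]
    simp [hm]

-- B's loop: the count is the number of positions whose table lookup succeeds
theorem B_fold (m : Nat) (valid : List Bool) :
    ∀ (l2 : List Char) (c0 b0 : Nat),
    l2.foldl
      (fun (st : Nat × Nat) c =>
        ((if valid.getD (st.2 % m) false then st.1 + 1 else st.1),
         st.2 + (if pvIsBr c then 1 else 0)))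
      (c0, b0)
    = (c0 + (List.range l2.length).countP
          (fun j => valid.getD ((b0 + ((l2.take j).filter pvIsBr).length) % m) false),
       b0 + (l2.filter pvIsBr).length) := by
  intro l2
  induction l2 with
  | nil => intro c0 b0; simp
  | cons c rest ih =>
    intro c0 b0
    simp only [List.foldl_cons]
    rw [ih]
    have hlen : (c :: rest).length = rest.length + 1 := rfl
    rw [hlen, List.range_succ_eq_map]
    simp only [List.countP_cons, List.countP_map, Function.comp_def, List.take_zero,
      List.filter_nil, List.length_nil, Nat.add_zero, List.take_succ_cons, List.filter_cons]
    simp only [Prod.mk.injEq]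
    refine ⟨?_, ?_⟩
    · have hp : (fun j => valid.getD ((b0 + (if pvIsBr c then 1 else 0)
            + ((rest.take j).filter pvIsBr).length) % m) false)
          = (fun j => valid.getD ((b0 + ((if pvIsBr c = true then c :: (rest.take j).filter pvIsBr
              else (rest.take j).filter pvIsBr)).length) % m) false) := by
        funext j
        by_cases h : pvIsBr c = true <;>
          simp [h, Nat.add_assoc, Nat.add_comm 1]
      rw [hp]
      split_ifs with hg <;> omega
    · by_cases h : pvIsBr c = true <;> simp [h] <;> omega

-- the heart: A's check of rotation i equals B's table lookup at the prefix bracket count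
theorem key (l : List Char) (i : Nat) (hm0 : (l.filter pvIsBr).length ≠ 0) :
    gwalho_pair (l.drop i ++ l.take i)
    = ((List.range (l.filter pvIsBr).length).map
        (fun k => validLoop [] ((l.filter pvIsBr).drop k ++ (l.filter pvIsBr).take k))).getD
        ((((l.take i).filter pvIsBr).length) % (l.filter pvIsBr).length) false := by
  set t := l.filter pvIsBr with ht
  set b := ((l.take i).filter pvIsBr).length with hbdef
  have h1 : gwalho_pair (l.drop i ++ l.take i)
      = gwalhoLoop [] (t.drop b ++ t.take b) := by
    rw [gwalho_pair, gwalhoLoop_filter, filter_rot]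
  have hmem : ∀ c ∈ t.drop b ++ t.take b, pvIsBr c = true := by
    intro c hc
    rcases List.mem_append.mp hc with h | h
    · exact (List.mem_filter.mp (List.mem_of_mem_drop h)).2
    · exact (List.mem_filter.mp (List.mem_of_mem_take h)).2
  rw [h1, gwalhoLoop_eq_validLoop _ hmem,
    valid_getD t t.length rfl hm0 b (by rw [hbdef, ht]; exact bcount_le l i)]

-- ===== VERDICT (by name: the statement is the Claim_ definition above) =====
theorem solution_spec : Claim_equal_solution := by
  intro s _
  unfold Spec_solution solution solution_alt
  simp only []
  rw [A_fold s.toList s.toList.length le_rfl]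
  by_cases hm : (s.toList.filter pvIsBr).length = 0
  · -- no brackets at all: every rotation is valid, both sides count every position
    rw [if_pos hm]
    have htnil : s.toList.filter pvIsBr = [] := List.eq_nil_of_length_eq_zero hm
    have hall : ∀ i ∈ List.range s.toList.length,
        (fun i => gwalho_pair (s.toList.drop i ++ s.toList.take i)) i = true := by
      intro i _
      simp only
      rw [gwalho_pair, gwalhoLoop_filter, filter_rot, htnil]
      simp [gwalhoLoop]
    rw [List.countP_eq_length.mpr hall, List.length_range]
  · rw [if_neg hm, B_fold]
    simp only [Nat.zero_add]
    congr 1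
    apply List.countP_congr
    intro i _
    rw [key s.toList i hm]
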